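-- pv_equiv track=rewrite | github.com/AmoghMK/pes_university-projects_and_assignments | Kerberos-Authentication-Protocol/data_sender.py | padremove
-- ===== SOURCE A (Python) =====
-- def padremove(data):
--     flag=1
--     i=len(data)-1
--     while(flag==1 and i>0):
--         if (data[i]=='0'):
--             i-=1
--         elif (data[i]=='1'):
--             flag=0
--         else:
--             flag=-1
--     if flag==0:
--         return(data[:i])
--     else:
--         return(data)
-- ===== SOURCE B (Python) =====
-- def padremove(data):
--     # Forward single pass: remember the index of the last non-'0' character,
--     # then cut there only if it is a '1' past index 0.
--     j = -1
--     for k, c in enumerate(data):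
--         if c != '0':
--             j = k
--     if j > 0 and data[j] == '1':
--         return data[:j]
--     return data
-- ===== Notes on version B (the rewrite author's own statement) =====
-- stated objective: alternative
-- what changed: Replaces A's backward while loop (flag/index state machine skipping trailing zeros) with a single forward enumerate pass that records the index of the last non-'0' character, followed by one guarded slice.
import Mathlib
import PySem

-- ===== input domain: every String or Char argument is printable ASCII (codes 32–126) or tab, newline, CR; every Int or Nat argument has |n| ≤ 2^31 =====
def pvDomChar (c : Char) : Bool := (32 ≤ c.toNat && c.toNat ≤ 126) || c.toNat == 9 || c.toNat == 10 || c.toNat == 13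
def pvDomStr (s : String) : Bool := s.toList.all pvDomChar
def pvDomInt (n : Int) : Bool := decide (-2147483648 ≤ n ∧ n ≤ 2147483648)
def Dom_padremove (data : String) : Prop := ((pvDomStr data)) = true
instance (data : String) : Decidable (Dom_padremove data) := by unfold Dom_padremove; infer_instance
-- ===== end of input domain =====

-- B replaces A's backward flag/index while loop by a forward enumerate pass recording the last non-'0' index, plus one guarded slice (alternative decomposition).


-- ===== PORT A =====
-- A's while loop, processing indices i, i-1, …, stopping when flag ≠ 1 or i = 0;
-- returns the final (flag, i).  data[i] is always in range here (i starts at len-1).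
def padremoveLoop (s : List Char) : Nat → Int × Nat
  | 0 => (1, 0)
  | i + 1 =>
    let c := s.getD (i + 1) ' '
    if c = '0' then padremoveLoop s i
    else if c = '1' then (0, i + 1)
    else (-1, i + 1)

def padremove (data : String) : String :=
  let s := data.toList
  -- i = len(data)-1; for empty data Python's i = -1 skips the loop and returns data,
  -- exactly as the Nat start index 0 does here (the loop returns flag 1 at 0).
  let r := padremoveLoop s (s.length - 1)
  if r.1 = 0 then String.ofList (PySem.List.slice s none (some (r.2 : Int)))  -- data[:i]
  else data

-- ===== PORT B =====
def padremove_alt (data : String) : String :=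
  let s := data.toList
  -- forward pass: j = index of the last character ≠ '0' (-1 if none)
  let j := (PySem.List.enumerate s).foldl (fun j kc => if kc.2 ≠ '0' then kc.1 else j) (-1)
  if j > 0 ∧ PySem.List.pyGet? s j = some '1' then
    String.ofList (PySem.List.slice s none (some j))  -- data[:j]
  else data

-- ===== PRECONDITION & SPEC =====
def Spec_padremove (data : String) (out : String) : Prop := out = padremove_alt data
instance (data : String) (out : String) : Decidable (Spec_padremove data out) := by unfold Spec_padremove; infer_instance

-- ===== CLAIM (what is proved, stated in full; the proofs are below) =====
def Claim_equal_padremove : Prop := ∀ (data : String), Dom_padremove data → Spec_padremove data (padremove data)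

-- ===== LEMMAS AND PROOFS =====

-- Characterisation of A's loop: with u the reversed list of the chars at positions i, …, 1,
-- the loop's result is determined by dropWhile (· = '0') u.
def loopSpec (u : List Char) : Int × Nat :=
  match u.dropWhile (· = '0') with
  | [] => (1, 0)
  | c :: rest => if c = '1' then (0, rest.length + 1) else (-1, rest.length + 1)

lemma loopSpec_cons (c : Char) (u : List Char) :
    loopSpec (c :: u) =
      if c = '0' then loopSpec u
      else if c = '1' then (0, u.length + 1) else (-1, u.length + 1) := by
  unfold loopSpec
  rw [List.dropWhile_cons]
  by_cases h0 : c = '0' <;> simp [h0]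

lemma padremoveLoop_eq (s : List Char) (i : Nat) (h : i + 1 ≤ s.length) :
    padremoveLoop s i = loopSpec (((s.drop 1).take i).reverse) := by
  induction i with
  | zero => simp [padremoveLoop, loopSpec]
  | succ i ih =>
    have hlen1 : (s.drop 1).length = s.length - 1 := by simp
    have hi : i < (s.drop 1).length := by omega
    obtain ⟨c, hc⟩ : ∃ c, (s.drop 1)[i]? = some c := ⟨_, List.getElem?_eq_getElem hi⟩
    have hgets : s[i + 1]? = some c := by
      have h1i : 1 + i = i + 1 := Nat.add_comm 1 i
      rw [← hc, List.getElem?_drop, h1i]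
    have hrev : ((s.drop 1).take (i + 1)).reverse = c :: ((s.drop 1).take i).reverse := by
      rw [List.take_add_one, hc]; simp
    have hulen : (((s.drop 1).take i).reverse).length = i := by
      simp [List.length_take]; omega
    have hstep : padremoveLoop s (i + 1) =
        if c = '0' then padremoveLoop s i
        else if c = '1' then (0, i + 1) else (-1, i + 1) := by
      simp [padremoveLoop, List.getD, hgets]
    rw [hrev, loopSpec_cons, hulen, hstep, ih (by omega)]

lemma dropWhile_append_ne_nil {α : Type} (p : α → Bool) (u v : List α)
    (h : u.dropWhile p ≠ []) : (u ++ v).dropWhile p = u.dropWhile p ++ v := by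
  induction u with
  | nil => simp at h
  | cons a u ih =>
    by_cases ha : p a
    · simp only [List.cons_append, List.dropWhile_cons, ha] at h ⊢
      exact ih h
    · simp [ha]

lemma dropWhile_head_false {α : Type} (p : α → Bool) (l : List α) (c : α) (rest : List α)
    (h : l.dropWhile p = c :: rest) : p c = false := by
  induction l with
  | nil => simp at h
  | cons a l ih =>
    rw [List.dropWhile_cons] at h
    by_cases ha : p a
    · exact ih (by simpa [ha] using h)
    · rw [if_neg ha] at h
      cases h
      exact Bool.eq_false_iff.mpr ha

-- Characterisation of B's forward fold: it computes (length of rstrip-'0' of s) - 1,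
-- i.e. the index of the last non-'0' character, or -1 if there is none.
lemma foldB_eq (s : List Char) :
    (PySem.List.enumerate s).foldl (fun j kc => if kc.2 ≠ '0' then kc.1 else j) (-1)
      = ((s.reverse.dropWhile (· = '0')).length : Int) - 1 := by
  induction s using List.reverseRecOn with
  | nil => simp [PySem.List.enumerate]
  | append_singleton s c ih =>
    rw [PySem.List.enumerate_append, List.foldl_append]
    have h1 : PySem.List.enumerate [c] (0 + (s.length : Int)) = [((s.length : Int), c)] := by
      simp [PySem.List.enumerate_cons, PySem.List.enumerate_nil]
    rw [h1]
    simp only [List.foldl_cons, List.foldl_nil, List.reverse_append, List.reverse_cons,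
      List.reverse_nil, List.nil_append, List.cons_append, List.dropWhile_cons]
    by_cases h0 : c = '0'
    · rw [if_neg (by simp [h0]), if_pos (by simp [h0]), ih]
    · rw [if_pos (by simp [h0]), if_neg (by simp [h0])]
      simp

theorem padremove_eq_alt (data : String) : padremove data = padremove_alt data := by
  unfold padremove padremove_alt
  cases hst : data.toList with
  | nil => simp [padremoveLoop, PySem.List.enumerate]
  | cons h₀ t =>
    dsimp only
    have hlen : (h₀ :: t).length - 1 = t.length := by simp
    have hdrop : (((h₀ :: t).drop 1).take t.length).reverse = t.reverse := by simp
    have hloop : padremoveLoop (h₀ :: t) ((h₀ :: t).length - 1) = loopSpec t.reverse := by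
      rw [hlen, padremoveLoop_eq _ _ (by simp), hdrop]
    have hrev : (h₀ :: t).reverse = t.reverse ++ [h₀] := by simp
    rw [hloop, foldB_eq, hrev]
    cases hdw : t.reverse.dropWhile (· = '0') with
    | nil =>
      -- A: flag stays 1, return data.  B: j = length(rstrip) - 1 ≤ 0, return data.
      have hdw2 : (t.reverse ++ [h₀]).dropWhile (· = '0') = [h₀].dropWhile (· = '0') := by
        rw [List.dropWhile_append]; simp [hdw]
      rw [hdw2]
      simp only [loopSpec, hdw]
      by_cases h0 : h₀ = '0'
      · simp [List.dropWhile, h0]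
      · simp [List.dropWhile, h0]
    | cons c rest =>
      have hc0 : c ≠ '0' := by
        have := dropWhile_head_false _ _ _ _ hdw
        simpa using this
      have hdw2 : (t.reverse ++ [h₀]).dropWhile (· = '0') = (c :: rest) ++ [h₀] :=
        by rw [dropWhile_append_ne_nil _ _ _ (by simp [hdw]), hdw]
      rw [hdw2]
      simp only [loopSpec, hdw]
      -- j = rest.length + 1
      have hjlen : ((((c :: rest) ++ [h₀]).length : Int)) - 1 = ((rest.length + 1 : Nat) : Int) := by
        simp
      rw [hjlen]
      -- the character of s = h₀ :: t at index rest.length + 1 is c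
      have ht : t = rest.reverse ++ [c] ++ (t.reverse.takeWhile (· = '0')).reverse := by
        conv_lhs => rw [← List.reverse_reverse t,
          ← List.takeWhile_append_dropWhile (p := (· = '0')) (l := t.reverse), hdw]
        simp
      have hget : PySem.List.pyGet? (h₀ :: t) ((rest.length + 1 : Nat) : Int) = some c := by
        rw [PySem.List.pyGet?_natCast]
        rw [ht]
        have : (h₀ :: (rest.reverse ++ [c] ++ (t.reverse.takeWhile (· = '0')).reverse))
            = (h₀ :: rest.reverse) ++ ([c] ++ (t.reverse.takeWhile (· = '0')).reverse) := by simp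
        rw [this]
        rw [List.getElem?_append_right (by simp)]
        simp
      have hpos : (0 : Int) < ((rest.length + 1 : Nat) : Int) := by positivity
      by_cases h1 : c = '1'
      · rw [if_pos h1, if_pos (show ((0 : Int), rest.length + 1).1 = 0 by norm_num)]
        split_ifs with h2
        · norm_num
        · exact absurd ⟨hpos, by rw [hget, h1]⟩ h2
      · rw [if_neg h1, if_neg (show ¬((-1 : Int), rest.length + 1).1 = 0 by norm_num)]
        split_ifs with h2
        · obtain ⟨-, hl⟩ := h2
          rw [hget] at hl
          exact absurd (Option.some.inj hl) h1
        · rfl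

-- ===== VERDICT (by name: the statement is the Claim_ definition above) =====
theorem padremove_spec : Claim_equal_padremove := by
  intro data _
  exact padremove_eq_alt data
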